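-- pv_equiv track=rewrite | github.com/NKU-EmbeddedSystem/gadgets | sibgadgets/debug.py | calculate
-- ===== SOURCE A (Python) =====
-- def calculate(index, base):
--     i = 0
--     left = 0
--     res = []
--     while i < 0xff:
--         if i & 7 == base or (i >> 3) & 7 == index:
--             if left <= i - 1:
--                 res.append((bin(left), bin(i - 1)))
--             left = i + 1
--         i += 1
--
--     return res
-- ===== SOURCE B (Python) =====
-- def calculate(index, base):
--     # Generate the matching positions arithmetically (residue classes / row blocks)
--     # instead of testing every value in 0..254, then close the gaps between
--     # consecutive sorted marks.
--     marks = set()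
--     if 0 <= base <= 7:
--         marks.update(range(base, 255, 8))
--     if 0 <= index <= 7:
--         for j in (index, index + 8, index + 16, index + 24):
--             marks.update(range(8 * j, min(8 * j + 8, 255)))
--     res = []
--     prev = -1
--     for m in sorted(marks):
--         if prev + 1 <= m - 1:
--             res.append((bin(prev + 1), bin(m - 1)))
--         prev = m
--     return res
-- ===== Notes on version B (the rewrite author's own statement) =====
-- stated objective: alternative
-- what changed: B generates the matching positions arithmetically as a set (the residue class of base mod 8 and the four 8-wide row blocks of index), sorts it, and closes the gaps between consecutive marks, instead of A's sweep that tests the mask condition on every value 0..254 while carrying a mutable left boundary.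
import Mathlib
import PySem

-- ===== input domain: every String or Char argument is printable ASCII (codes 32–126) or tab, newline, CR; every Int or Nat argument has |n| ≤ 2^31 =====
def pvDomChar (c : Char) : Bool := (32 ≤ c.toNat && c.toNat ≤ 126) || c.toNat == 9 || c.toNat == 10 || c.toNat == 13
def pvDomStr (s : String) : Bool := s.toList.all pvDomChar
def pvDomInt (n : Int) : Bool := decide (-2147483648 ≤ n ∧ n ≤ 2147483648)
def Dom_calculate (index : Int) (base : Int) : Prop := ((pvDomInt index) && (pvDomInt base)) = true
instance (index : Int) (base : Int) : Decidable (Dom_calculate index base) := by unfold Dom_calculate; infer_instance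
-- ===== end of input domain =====

-- B generates the matching positions arithmetically (residue class of base, row blocks of index)
-- as a set, instead of testing every value of 0..254, then closes the gaps between the sorted
-- marks (alternative algorithm, same cost on this fixed range).

-- ===== PORT A =====
-- A's mask test `i & 7 == base or (i >> 3) & 7 == index`
def pvCond (index : Int) (base : Int) (i : Int) : Bool :=
  (PySem.Int.band i 7 == base) || (PySem.Int.band (i >>> 3) 7 == index)

-- A's while loop over i = 0..254 carrying state (left, res)
def pvAStep (index : Int) (base : Int) (st : Int × List (String × String)) (i : Int) :
    Int × List (String × String) :=
  if pvCond index base i then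
    (i + 1, if st.1 ≤ i - 1 then st.2 ++ [(PySem.Int.pyBin st.1, PySem.Int.pyBin (i - 1))] else st.2)
  else st

def calculate (index : Int) (base : Int) : List (String × String) :=
  ((PySem.List.pyRange 0 255 1).foldl (pvAStep index base) (0, [])).2

-- ===== PORT B =====
-- the arithmetically generated set of marks (Source B's `marks`)
def pvMarks (index : Int) (base : Int) : PySem.Set Int :=
  let m : PySem.Set Int := PySem.Set.empty
  let m := if 0 ≤ base ∧ base ≤ 7 then PySem.Set.update m (PySem.List.pyRange base 255 8) else m
  let m := if 0 ≤ index ∧ index ≤ 7 then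
      [index, index + 8, index + 16, index + 24].foldl
        (fun s j => PySem.Set.update s (PySem.List.pyRange (8 * j) (min (8 * j + 8) 255) 1)) m
    else m
  m

-- Source B's gap-closing pass over the sorted marks, state (prev, res)
def pvBStep (st : Int × List (String × String)) (m : Int) : Int × List (String × String) :=
  (m, if st.1 + 1 ≤ m - 1 then
        st.2 ++ [(PySem.Int.pyBin (st.1 + 1), PySem.Int.pyBin (m - 1))]
      else st.2)

def calculate_alt (index : Int) (base : Int) : List (String × String) :=
  ((PySem.List.sorted (pvMarks index base) (fun x => x) false).foldl pvBStep (-1, [])).2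

-- ===== PRECONDITION & SPEC =====
def Spec_calculate (index : Int) (base : Int) (out : List (String × String)) : Prop := out = calculate_alt index base
instance (index : Int) (base : Int) (out : List (String × String)) : Decidable (Spec_calculate index base out) := by unfold Spec_calculate; infer_instance

-- ===== CLAIM (what is proved, stated in full; the proofs are below) =====
def Claim_equal_calculate : Prop := ∀ (index : Int) (base : Int), Dom_calculate index base → Spec_calculate index base (calculate index base)

-- ===== LEMMAS AND PROOFS =====

-- Python's  x >> 3  and  x & 7  on the nonnegative positions are division/remainder by 8
theorem pvShift3 (x : Int) (hx : 0 ≤ x) : x >>> (3 : Int) = x / 8 := by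
  obtain ⟨m, rfl⟩ := Int.eq_ofNat_of_zero_le hx
  rw [show (3 : ℤ) = ((3 : ℕ) : ℤ) from rfl, Int.shiftRight_natCast, Nat.shiftRight_eq_div_pow]
  have h8 : ((m / 8 : ℕ) : ℤ) = (m : ℤ) / 8 := by omega
  norm_num [h8]

theorem pvBand7 (x : Int) (hx : 0 ≤ x) : PySem.Int.band x 7 = x % 8 := by
  rw [PySem.Int.band_of_nonneg hx (by norm_num)]
  have h2 := Nat.and_two_pow_sub_one_eq_mod x.toNat 3
  norm_num at h2
  rw [show Int.toNat 7 = 7 from rfl, h2]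
  omega

theorem pvCond_iff (a b x : Int) (hx : 0 ≤ x) :
    pvCond a b x = true ↔ (x % 8 = b ∨ (x / 8) % 8 = a) := by
  unfold pvCond
  rw [pvShift3 x hx, pvBand7 x hx, pvBand7 (x / 8) (Int.ediv_nonneg hx (by norm_num))]
  simp

theorem pvMarks_nodup (a b : Int) : (pvMarks a b).Nodup := by
  unfold pvMarks
  simp only [List.foldl]
  split_ifs <;> (repeat apply PySem.Set.nodup_update) <;> exact List.nodup_nil

-- membership in the arithmetically generated mark set = acceptance by A's mask test
theorem pvMem (a b x : Int) :
    x ∈ pvMarks a b ↔ x ∈ (PySem.List.pyRange 0 255 1).filter (pvCond a b) := by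
  have hr : x ∈ (PySem.List.pyRange 0 255 1).filter (pvCond a b) ↔
      (0 ≤ x ∧ x < 255) ∧ (x % 8 = b ∨ (x / 8) % 8 = a) := by
    rw [List.mem_filter, PySem.List.mem_pyRange_one]
    constructor
    · rintro ⟨hb, hc⟩; exact ⟨hb, (pvCond_iff a b x hb.1).mp hc⟩
    · rintro ⟨hb, hc⟩; exact ⟨hb, (pvCond_iff a b x hb.1).mpr hc⟩
  rw [hr]
  unfold pvMarks
  simp only [List.foldl]
  split_ifs <;>
    simp [PySem.Set.mem_update, PySem.List.mem_pyRange_iff_of_pos (by norm_num : (0:Int) < 8),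
      PySem.List.mem_pyRange_one, PySem.Set.empty] <;>
    omega

-- the sorted mark set is exactly the increasing list of positions A's test accepts
theorem pvMarks_sorted_eq (index base : Int) :
    PySem.List.sorted (pvMarks index base) (fun x => x) false =
      (PySem.List.pyRange 0 255 1).filter (pvCond index base) :=
  PySem.List.sorted_eq_of_perm_of_pairwise_lt _ _ _
    ((List.perm_ext_iff_of_nodup
        ((PySem.List.nodup_pyRange_one 0 255).filter _) (pvMarks_nodup index base)).mpr
      (fun x => (pvMem index base x).symm))
    ((PySem.List.pairwise_lt_pyRange_one 0 255).filter _)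

-- A's sweep with left = prev + 1 equals the gap-closing pass over the accepted positions
theorem pvFoldCorr (index base : Int) (L : List Int) :
    ∀ (prev : Int) (res : List (String × String)),
      L.foldl (pvAStep index base) (prev + 1, res) =
        (((L.filter (pvCond index base)).foldl pvBStep (prev, res)).1 + 1,
         ((L.filter (pvCond index base)).foldl pvBStep (prev, res)).2) := by
  induction L with
  | nil => intro prev res; simp
  | cons i L ih =>
    intro prev res
    by_cases h : pvCond index base i
    · simp only [List.foldl_cons, List.filter_cons, h, if_true, pvAStep, pvBStep]
      exact ih i _
    · simp only [List.foldl_cons, List.filter_cons, h, pvAStep, Bool.false_eq_true, if_false]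
      exact ih prev res

-- ===== VERDICT (by name: the statement is the Claim_ definition above) =====
theorem calculate_spec : Claim_equal_calculate := by
  intro index base _
  unfold Spec_calculate calculate calculate_alt
  have h := pvFoldCorr index base (PySem.List.pyRange 0 255 1) (-1) []
  norm_num at h
  rw [h, pvMarks_sorted_eq]
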